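-- pv_equiv track=rewrite | github.com/touch-my-tralala/fano_decoder | fano_decoder/fano_decoder.py | deperforator
-- ===== SOURCE A (Python) =====
-- def deperforator(data):
--     data_copy = data
--     perforate_mask = '111010'
--     data_out = ''
--     for i in range(len(perforate_mask)):
--         if perforate_mask[i] == '1':
--             data_out += data_copy[:1]
--             data_copy = data_copy[1:]
--         else:
--             data_out += '0'
--     return data_out
-- ===== SOURCE B (Python) =====
-- def deperforator(data):
--     # mask '111010' is constant: 3 data chars, a '0', one data char, a '0'.
--     # slices (not indexing) so short inputs yield empty pieces like A does.
--     return data[:3] + '0' + data[3:4] + '0'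
-- ===== Notes on version B (the rewrite author's own statement) =====
-- stated objective: simpler
-- what changed: Replaced the mask-driven loop and branching with a direct closed-form concatenation of two input slices and two zero characters, derived from the constant perforation mask.
import Mathlib
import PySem

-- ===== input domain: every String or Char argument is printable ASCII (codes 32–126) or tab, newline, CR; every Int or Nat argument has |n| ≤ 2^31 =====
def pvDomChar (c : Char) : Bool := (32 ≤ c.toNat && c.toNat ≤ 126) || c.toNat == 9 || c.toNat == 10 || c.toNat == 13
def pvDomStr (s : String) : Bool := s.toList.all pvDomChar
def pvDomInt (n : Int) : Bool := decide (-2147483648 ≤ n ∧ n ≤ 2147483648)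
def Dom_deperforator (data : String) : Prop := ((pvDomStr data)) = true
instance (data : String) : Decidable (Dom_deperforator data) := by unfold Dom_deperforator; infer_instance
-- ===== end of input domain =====

-- B replaces A's mask-driven loop by a closed-form slice construction (simpler).

-- ===== PORT A =====
-- loop over range(len(mask)) with state (data_out, data_copy); strings carried as List Char
def deperforator (data : String) : String :=
  let perforate_mask : List Char := "111010".toList
  let st := (PySem.List.pyRange 0 (PySem.Chars.len perforate_mask) 1).foldl
    (fun (st : List Char × List Char) i =>
      if PySem.Chars.pyGet? perforate_mask i = some '1' then
        (st.1 ++ PySem.Chars.slice st.2 none (some 1), PySem.Chars.slice st.2 (some 1) none)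
      else
        (st.1 ++ ['0'], st.2))
    (([] : List Char), data.toList)
  String.ofList st.1

-- ===== PORT B =====
def deperforator_alt (data : String) : String :=
  let l := data.toList
  String.ofList (PySem.Chars.slice l none (some 3) ++ ['0'] ++
                 PySem.Chars.slice l (some 3) (some 4) ++ ['0'])

-- ===== PRECONDITION & SPEC =====
def Spec_deperforator (data : String) (out : String) : Prop := out = deperforator_alt data
instance (data : String) (out : String) : Decidable (Spec_deperforator data out) := by unfold Spec_deperforator; infer_instance

-- ===== CLAIM (what is proved, stated in full; the proofs are below) =====
def Claim_equal_deperforator : Prop := ∀ (data : String), Dom_deperforator data → Spec_deperforator data (deperforator data)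

-- ===== LEMMAS AND PROOFS =====

theorem deperforator_lists (data : String) :
    deperforator data = deperforator_alt data := by
  simp only [deperforator, deperforator_alt]
  have hm : "111010".toList = ['1','1','1','0','1','0'] := by decide
  rw [hm]
  have hr : PySem.List.pyRange 0 (PySem.Chars.len ['1','1','1','0','1','0']) 1 = [0,1,2,3,4,5] := by decide
  rw [hr]
  generalize data.toList = l
  simp only [List.foldl]
  norm_num only [PySem.Chars.pyGet?_eq_listPyGet?, PySem.List.pyGet?_zero_cons,
    PySem.List.pyGet?_of_nonneg, Int.toNat_one, List.getElem?_cons_succ,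
    List.getElem?_cons_zero, Option.some.injEq, reduceCtorEq, if_true, if_false,
    PySem.Chars.slice_eq_listSlice, PySem.List.slice_to, PySem.List.slice_from,
    PySem.List.slice_toNat]
  match l with
  | [] => rfl
  | [a] => rfl
  | [a, b] => rfl
  | [a, b, c] => rfl
  | a :: b :: c :: d :: rest => simp

-- ===== VERDICT (by name: the statement is the Claim_ definition above) =====
theorem deperforator_spec : Claim_equal_deperforator := by
  intro data _
  exact deperforator_lists data
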